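-- pv_equiv track=rewrite | github.com/FSund/adventofcode | 2023/12/run.py | matches_arrangement
-- ===== SOURCE A (Python) =====
-- def matches_arrangement(line, arrangement):
--     groups = [[]]
--     for i in range(len(line)):
--         if line[i] == ".":
--             groups.append([])
--         elif line[i] == "#":
--             groups[-1].append(i)
--
--     counts = []
--     for group in groups:
--         if len(group) == 0:
--             continue
--         counts.append(len(group))
--
--     return counts == arrangement
-- ===== SOURCE B (Python) =====
-- def matches_arrangement(line, arrangement):
--     # Streaming matcher: consume the line once, checking each finished '#'-run
--     # against the next expected arrangement entry, with early exit on mismatch.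
--     idx = 0
--     run = 0
--     for ch in line:
--         if ch == ".":
--             if run != 0:
--                 if idx >= len(arrangement) or arrangement[idx] != run:
--                     return False
--                 idx += 1
--                 run = 0
--         elif ch == "#":
--             run += 1
--     if run != 0:
--         if idx >= len(arrangement) or arrangement[idx] != run:
--             return False
--         idx += 1
--     return idx == len(arrangement)
-- ===== Notes on version B (the rewrite author's own statement) =====
-- stated objective: alternative
-- what changed: Replaces A's build-all-group-position-lists-then-collect-lengths-then-compare-lists structure with a single-pass streaming matcher that keeps only a run counter and an index into arrangement, checking each finished '#'-run against the next expected entry and exiting early on mismatch.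
import Mathlib
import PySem

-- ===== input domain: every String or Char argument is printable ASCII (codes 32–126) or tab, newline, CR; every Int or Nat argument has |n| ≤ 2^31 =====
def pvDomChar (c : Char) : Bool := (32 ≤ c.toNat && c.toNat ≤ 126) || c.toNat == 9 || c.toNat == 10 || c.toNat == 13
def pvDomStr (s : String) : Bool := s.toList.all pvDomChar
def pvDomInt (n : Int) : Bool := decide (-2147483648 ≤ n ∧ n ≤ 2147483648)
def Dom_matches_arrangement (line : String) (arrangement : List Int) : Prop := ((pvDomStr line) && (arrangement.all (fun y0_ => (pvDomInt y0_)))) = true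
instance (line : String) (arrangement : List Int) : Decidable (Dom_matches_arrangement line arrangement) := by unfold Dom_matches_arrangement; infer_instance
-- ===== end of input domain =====

-- B replaces A's build-groups-then-collect-lengths-then-compare-lists structure with a
-- one-pass streaming matcher (run counter + index into arrangement, early exit); equivalence proved on all inputs.

-- ===== PORT A =====
-- groups[-1].append(i): append i to the last group
def pvAppendLast (gs : List (List Int)) (i : Int) : List (List Int) :=
  match gs with
  | [] => []
  | [g] => [g ++ [i]]
  | g :: h :: t => g :: pvAppendLast (h :: t) i

def matches_arrangement (line : String) (arrangement : List Int) : Bool :=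
  let groups := (PySem.List.pyRange 0 (PySem.Str.len line) 1).foldl
    (fun gs i =>
      if PySem.List.pyGetD line.toList i ' ' == '.' then gs ++ [([] : List Int)]
      else if PySem.List.pyGetD line.toList i ' ' == '#' then pvAppendLast gs i
      else gs) [[]]
  let counts := groups.foldl
    (fun acc g => if g.length == 0 then acc else acc ++ [(g.length : Int)]) ([] : List Int)
  counts == arrangement

-- ===== PORT B =====
-- the for-loop with early return, as structural recursion on the remaining characters;
-- state (idx, run) mirrors Source B's variables, and the trailing flush is the [] case
def pvAltGo (arr : List Int) : List Char → Nat → Nat → Bool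
  | [], idx, run =>
      if run ≠ 0 then
        if arr.length ≤ idx ∨ ¬ (arr.getD idx 0 = (run : Int)) then false
        else ((idx + 1 : Nat) == arr.length)
      else (idx == arr.length)
  | c :: rest, idx, run =>
      if c = '.' then
        if run ≠ 0 then
          if arr.length ≤ idx ∨ ¬ (arr.getD idx 0 = (run : Int)) then false
          else pvAltGo arr rest (idx + 1) 0
        else pvAltGo arr rest idx 0
      else pvAltGo arr rest idx (if c = '#' then run + 1 else run)

def matches_arrangement_alt (line : String) (arrangement : List Int) : Bool :=
  pvAltGo arrangement line.toList 0 0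

-- ===== PRECONDITION & SPEC =====
def Spec_matches_arrangement (line : String) (arrangement : List Int) (out : Bool) : Prop := out = matches_arrangement_alt line arrangement
instance (line : String) (arrangement : List Int) (out : Bool) : Decidable (Spec_matches_arrangement line arrangement out) := by unfold Spec_matches_arrangement; infer_instance

-- ===== CLAIM (what is proved, stated in full; the proofs are below) =====
def Claim_equal_matches_arrangement : Prop := ∀ (line : String) (arrangement : List Int), Dom_matches_arrangement line arrangement → Spec_matches_arrangement line arrangement (matches_arrangement line arrangement)

-- ===== LEMMAS AND PROOFS =====

-- the group-size list A computes, in one structural pass (k = '#'-count of the current run)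
def pvCounts : Nat → List Char → List Int
  | k, [] => if k = 0 then [] else [(k : Int)]
  | k, c :: rest =>
      if c = '.' then (if k = 0 then [] else [(k : Int)]) ++ pvCounts 0 rest
      else pvCounts (if c = '#' then k + 1 else k) rest

-- A-side loop pieces
def pvStepE (gs : List (List Int)) (p : Int × Char) : List (List Int) :=
  if p.2 == '.' then gs ++ [([] : List Int)]
  else if p.2 == '#' then pvAppendLast gs p.1
  else gs

def pvCountsOf (gs : List (List Int)) : List Int :=
  gs.foldl (fun acc g => if g.length == 0 then acc else acc ++ [(g.length : Int)]) []

theorem pvFoldl_out (gs : List (List Int)) : ∀ a : List Int,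
    gs.foldl (fun acc g => if g.length == 0 then acc else acc ++ [(g.length : Int)]) a
      = a ++ pvCountsOf gs := by
  induction gs with
  | nil => intro a; simp [pvCountsOf]
  | cons g rest ih =>
    intro a
    rw [List.foldl_cons, show pvCountsOf (g :: rest)
        = List.foldl (fun acc g => if g.length == 0 then acc else acc ++ [(g.length : Int)])
            (if g.length == 0 then [] else [] ++ [(g.length : Int)]) rest from rfl]
    by_cases h : (g.length == 0) = true
    · rw [if_pos h, if_pos h, ih]
      rfl
    · rw [if_neg h, if_neg h, ih, ih ([] ++ [(g.length : Int)])]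
      simp [pvCountsOf]

theorem pvCountsOf_snoc (pre : List (List Int)) (g : List Int) :
    pvCountsOf (pre ++ [g])
      = pvCountsOf pre ++ (if g.length = 0 then [] else [(g.length : Int)]) := by
  rw [pvCountsOf, List.foldl_append, pvFoldl_out]
  by_cases h : g.length = 0
  · simp [pvCountsOf, h]
    exact List.length_eq_zero_iff.mp h
  · simp [pvCountsOf, h]
    exact fun e => h (by simp [e])

theorem pvAppendLast_snoc (i : Int) : ∀ (xs : List (List Int)) (g : List Int),
    pvAppendLast (xs ++ [g]) i = xs ++ [g ++ [i]] := by
  intro xs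
  induction xs with
  | nil => intro g; simp [pvAppendLast]
  | cons x rest ih =>
    intro g
    cases hr : rest ++ [g] with
    | nil => simp at hr
    | cons y ys =>
      simp only [List.cons_append, hr, pvAppendLast]
      rw [← hr, ih]

theorem pvA_inv (cs : List Char) : ∀ (s : Int) (pre : List (List Int)) (g : List Int),
    pvCountsOf ((PySem.List.enumerate cs s).foldl pvStepE (pre ++ [g]))
      = pvCountsOf pre ++ pvCounts g.length cs := by
  induction cs with
  | nil =>
    intro s pre g
    rw [show PySem.List.enumerate ([] : List Char) s = [] from rfl, List.foldl_nil,
      pvCountsOf_snoc, show pvCounts g.length [] = (if g.length = 0 then [] else [(g.length : Int)]) from rfl]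
  | cons c rest ih =>
    intro s pre g
    rw [PySem.List.enumerate_cons, List.foldl_cons]
    by_cases hc : c = '.'
    · subst hc
      rw [show pvStepE (pre ++ [g]) (s, '.') = (pre ++ [g]) ++ [([] : List Int)] from by
        simp [pvStepE]]
      rw [ih, pvCountsOf_snoc,
        show pvCounts g.length ('.' :: rest)
          = (if g.length = 0 then [] else [(g.length : Int)]) ++ pvCounts 0 rest from by
          simp [pvCounts]]
      simp [List.append_assoc]
    · by_cases hh : c = '#'
      · subst hh
        rw [show pvStepE (pre ++ [g]) (s, '#') = pvAppendLast (pre ++ [g]) s from by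
          simp [pvStepE]]
        rw [pvAppendLast_snoc, ih]
        simp [pvCounts, hc]
      · rw [show pvStepE (pre ++ [g]) (s, c) = pre ++ [g] from by
          simp [pvStepE, hc, hh]]
        rw [ih]
        simp [pvCounts, hc, hh]

theorem pvA_eq (line : String) (arrangement : List Int) :
    matches_arrangement line arrangement = (pvCounts 0 line.toList == arrangement) := by
  unfold matches_arrangement
  have hmap : PySem.List.enumerate line.toList
      = (PySem.List.pyRange 0 (PySem.Str.len line) 1).map
          (fun j => (j, PySem.List.pyGetD line.toList j ' ')) := by
    rw [PySem.List.enumerate_eq_map_pyRange line.toList ' ']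
    rfl
  have hfold : (PySem.List.pyRange 0 (PySem.Str.len line) 1).foldl
      (fun gs i =>
        if PySem.List.pyGetD line.toList i ' ' == '.' then gs ++ [([] : List Int)]
        else if PySem.List.pyGetD line.toList i ' ' == '#' then pvAppendLast gs i
        else gs) [[]]
      = (PySem.List.enumerate line.toList).foldl pvStepE [[]] := by
    rw [hmap, List.foldl_map]
    rfl
  simp only [hfold]
  have h := pvA_inv line.toList 0 [] []
  simp only [List.length_nil] at h
  rw [show ([[]] : List (List Int)) = ([] : List (List Int)) ++ [([] : List Int)] from rfl,
    pvFoldl_out, h]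
  simp [pvCountsOf]

-- B-side: flushing a nonzero run consumes exactly one expected arrangement entry
theorem pvFlush (arr : List Int) (idx run : Nat) (h : idx ≤ arr.length)
    (K : Bool) (L : List Int) (hK : idx < arr.length → K = (L == arr.drop (idx + 1))) :
    (if arr.length ≤ idx ∨ ¬ (arr.getD idx 0 = ((run : Nat) : Int)) then false else K)
      = ((((run : Nat) : Int) :: L) == arr.drop idx) := by
  rcases lt_or_eq_of_le h with hlt | heq
  · rw [List.drop_eq_getElem_cons hlt]
    by_cases hv : arr[idx] = ((run : Nat) : Int)
    · rw [if_neg (by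
        push Not
        exact ⟨by omega, by rw [List.getD_eq_getElem _ _ hlt]; exact hv⟩), hK hlt]
      simp [hv]
    · rw [if_pos (Or.inr (by rw [List.getD_eq_getElem _ _ hlt]; exact hv))]
      symm
      rw [beq_eq_false_iff_ne]
      intro e
      injection e with e1 _
      exact hv e1.symm
  · rw [if_pos (Or.inl (le_of_eq heq.symm))]
    rw [heq, List.drop_length]
    simp

theorem pvAltGo_eq (arr : List Int) (cs : List Char) : ∀ (idx run : Nat), idx ≤ arr.length →
    pvAltGo arr cs idx run = (pvCounts run cs == arr.drop idx) := by
  induction cs with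
  | nil =>
    intro idx run h
    by_cases hr : run = 0
    · subst hr
      rw [show pvAltGo arr [] idx 0 = ((idx : Nat) == arr.length) from by simp [pvAltGo],
        show pvCounts 0 [] = ([] : List Int) from rfl]
      by_cases he : idx = arr.length
      · simp [he]
      · have : arr.drop idx ≠ [] := by
          intro e
          have := List.drop_eq_nil_iff.mp e
          omega
        rw [show ((idx : Nat) == arr.length) = false from by simp [he]]
        symm
        rw [beq_eq_false_iff_ne]
        exact fun e => this e.symm
    · rw [show pvAltGo arr [] idx run
          = (if arr.length ≤ idx ∨ ¬ (arr.getD idx 0 = ((run : Nat) : Int)) then false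
             else ((idx + 1 : Nat) == arr.length)) from by simp [pvAltGo, hr],
        show pvCounts run [] = [((run : Nat) : Int)] from by simp [pvCounts, hr]]
      exact pvFlush arr idx run h _ [] (fun hlt => by
        by_cases he : idx + 1 = arr.length
        · simp [he, List.drop_length]
        · have : arr.drop (idx + 1) ≠ [] := by
            intro e
            have := List.drop_eq_nil_iff.mp e
            omega
          rw [show ((idx + 1 : Nat) == arr.length) = false from by simp [he]]
          symm
          rw [beq_eq_false_iff_ne]
          exact fun e => this e.symm)
  | cons c rest ih =>
    intro idx run h
    by_cases hc : c = '.'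
    · subst hc
      by_cases hr : run = 0
      · subst hr
        rw [show pvAltGo arr ('.' :: rest) idx 0 = pvAltGo arr rest idx 0 from by simp [pvAltGo],
          ih idx 0 h]
        simp [pvCounts]
      · rw [show pvAltGo arr ('.' :: rest) idx run
            = (if arr.length ≤ idx ∨ ¬ (arr.getD idx 0 = ((run : Nat) : Int)) then false
               else pvAltGo arr rest (idx + 1) 0) from by simp [pvAltGo, hr],
          show pvCounts run ('.' :: rest) = ((run : Nat) : Int) :: pvCounts 0 rest from by
            simp [pvCounts, hr]]
        exact pvFlush arr idx run h _ _ (fun hlt => ih (idx + 1) 0 (by omega))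
    · rw [show pvAltGo arr (c :: rest) idx run
          = pvAltGo arr rest idx (if c = '#' then run + 1 else run) from by simp [pvAltGo, hc],
        ih idx _ h,
        show pvCounts run (c :: rest) = pvCounts (if c = '#' then run + 1 else run) rest from by
          simp [pvCounts, hc]]

theorem pvB_eq (line : String) (arrangement : List Int) :
    matches_arrangement_alt line arrangement = (pvCounts 0 line.toList == arrangement) := by
  unfold matches_arrangement_alt
  rw [pvAltGo_eq arrangement line.toList 0 0 (Nat.zero_le _)]
  rfl

-- ===== VERDICT (by name: the statement is the Claim_ definition above) =====
theorem matches_arrangement_spec : Claim_equal_matches_arrangement := by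
  intro line arrangement _
  unfold Spec_matches_arrangement
  rw [pvA_eq, pvB_eq]
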